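-- pv_equiv track=rewrite | github.com/balrok/adventofcode | 2017/24/run.py | search
-- ===== SOURCE A (Python) =====
-- def search(pp,p,n):
--     lbest = best = sum([sum(i) for i in p])
--     longest = len(p)
--     for v in pp:
--         if n not in v:
--             continue
--         pp2 = pp[:]
--         pp2.remove(v)
--         newbest, newlbest, newlongest =search(pp2, p[:] + [v], (v[0],v[1])[v[0]==n])
--         best=max(best, newbest)
--         if newlongest > longest or (newlongest == longest and newlbest > lbest):
--             longest = newlongest
--             lbest = newlbest
--     return best, lbest, longest
-- ===== SOURCE B (Python) =====
-- def search(pp, p, n):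
--     # Breadth-first: expand all partial bridges level by level (at most len(pp)
--     # levels), keeping running maxima instead of combining recursive results.
--     strength = sum(a + b for a, b in p)
--     length = len(p)
--     best = strength
--     best_ls = (length, strength)
--     frontier = [(pp, n, strength, length)]
--     for _ in range(len(pp)):
--         nxt = []
--         for rem, end, s, l in frontier:
--             for v in rem:
--                 if end == v[0] or end == v[1]:
--                     child = rem[:]
--                     child.remove(v)
--                     nxt.append((child, v[1] if v[0] == end else v[0],
--                                 s + v[0] + v[1], l + 1))
--         for _, _, s, l in nxt:
--             if s > best:
--                 best = s
--             if (l, s) > best_ls: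
--                 best_ls = (l, s)
--         frontier = nxt
--     return best, best_ls[1], best_ls[0]
-- ===== Notes on version B (the rewrite author's own statement) =====
-- stated objective: alternative
-- what changed: Replaces A's recursive depth-first search (which recomputes the bridge strength by summing the whole prefix list at every node and merges child result triples) by an iterative breadth-first, level-by-level frontier expansion that carries strength/length incrementally in each state and keeps running maxima (best strength and the lexicographic (length, strength) best) over all generated partial bridges.
import Mathlib
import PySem

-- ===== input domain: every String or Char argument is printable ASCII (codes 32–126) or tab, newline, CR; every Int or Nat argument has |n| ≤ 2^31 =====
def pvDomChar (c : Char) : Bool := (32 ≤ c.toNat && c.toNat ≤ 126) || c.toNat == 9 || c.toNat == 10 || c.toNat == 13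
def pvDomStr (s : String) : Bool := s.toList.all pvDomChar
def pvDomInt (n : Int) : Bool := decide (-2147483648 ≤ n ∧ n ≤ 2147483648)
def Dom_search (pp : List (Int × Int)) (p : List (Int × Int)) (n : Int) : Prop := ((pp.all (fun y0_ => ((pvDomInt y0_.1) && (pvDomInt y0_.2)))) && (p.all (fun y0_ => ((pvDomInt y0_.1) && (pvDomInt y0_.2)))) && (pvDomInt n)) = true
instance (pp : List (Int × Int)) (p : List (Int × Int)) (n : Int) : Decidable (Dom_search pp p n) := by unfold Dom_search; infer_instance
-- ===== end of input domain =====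

-- B replaces A's recursive depth-first search by a breadth-first, level-by-level
-- expansion with running maxima (objective: alternative decomposition, same cost).

-- termination helper for the ports (cited by decreasing_by)
theorem remove?_some_length_lt {α : Type} [BEq α] [LawfulBEq α] {xs ys : List α} {v : α}
    (h : PySem.List.remove? xs v = some ys) : ys.length < xs.length := by
  have hv : v ∈ xs := by
    by_contra hv
    rw [(PySem.List.remove?_eq_none_iff xs v).mpr hv] at h
    simp at h
  rw [PySem.List.remove?_eq_some_erase xs v hv] at h
  cases h
  have := List.length_erase_of_mem hv
  have hpos : 0 < xs.length := List.length_pos_of_mem hv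
  omega

-- ===== PORT A =====
mutual
-- literal transliteration of A; the `none` branch of remove? is unreachable
-- (every v iterated over comes from pp itself, so Python's .remove never raises)
def search (pp : List (Int × Int)) (p : List (Int × Int)) (n : Int) : Int × Int × Int :=
  let best := (p.map (fun i => i.1 + i.2)).sum
  searchFor pp pp p n best best (Int.ofNat p.length)
termination_by (pp.length, 1, 0)

def searchFor (todo pp p : List (Int × Int)) (n best lbest longest : Int) : Int × Int × Int :=
  match todo with
  | [] => (best, lbest, longest)
  | v :: rest =>
    if ¬ (n = v.1 ∨ n = v.2) then searchFor rest pp p n best lbest longest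
    else
      match h : PySem.List.remove? pp v with
      | none => searchFor rest pp p n best lbest longest -- h unused here: Python raises ValueError, unreachable from search
      | some pp2 =>
        let r := search pp2 (p ++ [v]) (if v.1 = n then v.2 else v.1)
        let best' := max best r.1
        if r.2.2 > longest ∨ (r.2.2 = longest ∧ r.2.1 > lbest)
        then searchFor rest pp p n best' r.2.1 r.2.2
        else searchFor rest pp p n best' lbest longest
termination_by (pp.length, 0, todo.length)
decreasing_by
· exact Prod.Lex.right _ (Prod.Lex.right _ (by simp only [List.length_cons]; omega))
· exact Prod.Lex.right _ (Prod.Lex.right _ (by simp only [List.length_cons]; omega))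
· exact Prod.Lex.left _ _ (remove?_some_length_lt h)
· exact Prod.Lex.right _ (Prod.Lex.right _ (by simp only [List.length_cons]; omega))
· exact Prod.Lex.right _ (Prod.Lex.right _ (by simp only [List.length_cons]; omega))
end

-- ===== PORT B =====
-- a frontier state: (remaining components, current end, strength so far, length so far)
-- the inner `for v in rem: if …: nxt.append(child)` loop of Source B
def kids (rem rem0 : List (Int × Int)) (e s l : Int) : List (List (Int × Int) × Int × Int × Int) :=
  match rem with
  | [] => []
  | v :: rest =>
    if e = v.1 ∨ e = v.2 then
      (match PySem.List.remove? rem0 v with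
       | some c => [(c, if v.1 = e then v.2 else v.1, s + v.1 + v.2, l + 1)]
       | none => []) ++ kids rest rem0 e s l
    else kids rest rem0 e s l

-- one whole-frontier expansion (the `for rem, end, s, l in frontier` loop)
def altStep (fr : List (List (Int × Int) × Int × Int × Int)) : List (List (Int × Int) × Int × Int × Int) :=
  fr.flatMap (fun st => kids st.1 st.1 st.2.1 st.2.2.1 st.2.2.2)

-- the running-maxima update for one new state (acc = (best, best_ls))
def bump (acc : Int × Int × Int) (st : List (Int × Int) × Int × Int × Int) : Int × Int × Int :=
  (if st.2.2.1 > acc.1 then st.2.2.1 else acc.1,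
   if st.2.2.2 > acc.2.1 ∨ (st.2.2.2 = acc.2.1 ∧ st.2.2.1 > acc.2.2) then (st.2.2.2, st.2.2.1) else acc.2)

-- the `for _ in range(len(pp))` loop
def altLoop : Nat → List (List (Int × Int) × Int × Int × Int) → Int × Int × Int → Int × Int × Int
  | 0, _, acc => acc
  | k + 1, fr, acc =>
    let nxt := altStep fr
    altLoop k nxt (nxt.foldl bump acc)

def search_alt (pp : List (Int × Int)) (p : List (Int × Int)) (n : Int) : Int × Int × Int :=
  let s0 := (p.map (fun i => i.1 + i.2)).sum
  let l0 := Int.ofNat p.length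
  let r := altLoop pp.length [(pp, n, s0, l0)] (s0, l0, s0)
  (r.1, r.2.2, r.2.1)

-- ===== PRECONDITION & SPEC =====
def Spec_search (pp : List (Int × Int)) (p : List (Int × Int)) (n : Int) (out : Int × Int × Int) : Prop := out = search_alt pp p n
instance (pp : List (Int × Int)) (p : List (Int × Int)) (n : Int) (out : Int × Int × Int) : Decidable (Spec_search pp p n out) := by unfold Spec_search; infer_instance

-- ===== CLAIM (what is proved, stated in full; the proofs are below) =====
def Claim_equal_search : Prop := ∀ (pp : List (Int × Int)) (p : List (Int × Int)) (n : Int), Dom_search pp p n → Spec_search pp p n (search pp p n)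

-- ===== LEMMAS AND PROOFS =====

-- proof-side vocabulary: both programs take maxima of (strength, length) pairs over
-- the same tree of partial bridges; A in depth-first order, B level by level.
def pval (st : List (Int × Int) × Int × Int × Int) : Int × Int := (st.2.2.1, st.2.2.2)

-- combine acc (A's triple order: best, lbest, longest) with one node value (s, l)
def combine (a : Int × Int × Int) (x : Int × Int) : Int × Int × Int :=
  (max a.1 x.1, if x.2 > a.2.2 ∨ (x.2 = a.2.2 ∧ x.1 > a.2.1) then (x.1, x.2) else a.2)

-- A's merge of a recursive result into its accumulator
def mergeT (a r : Int × Int × Int) : Int × Int × Int :=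
  (max a.1 r.1, if r.2.2 > a.2.2 ∨ (r.2.2 = a.2.2 ∧ r.2.1 > a.2.1) then r.2 else a.2)

theorem kids_length_lt {rem rem0 : List (Int × Int)} {e s l : Int} {c}
    (hc : c ∈ kids rem rem0 e s l) : c.1.length < rem0.length := by
  induction rem with
  | nil => simp [kids] at hc
  | cons v rest ih =>
    rw [kids] at hc
    split at hc
    · rcases List.mem_append.mp hc with h1 | h2
      · split at h1
        next heq => rcases List.mem_singleton.mp h1 with rfl; exact remove?_some_length_lt heq
        · simp at h1
      · exact ih h2
    · exact ih hc

def nodes (st : List (Int × Int) × Int × Int × Int) : List (Int × Int) :=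
  pval st :: (kids st.1 st.1 st.2.1 st.2.2.1 st.2.2.2).attach.flatMap (fun c => nodes c.1)
termination_by st.1.length
decreasing_by exact kids_length_lt c.2

theorem combine_right_comm (a : Int × Int × Int) (x y : Int × Int) :
    combine (combine a x) y = combine (combine a y) x := by
  obtain ⟨b, lb, lg⟩ := a; obtain ⟨xs, xl⟩ := x; obtain ⟨ys, yl⟩ := y
  simp only [combine, Prod.ext_iff]
  constructor
  · omega
  · split_ifs <;> simp_all <;> omega

theorem mergeT_combine (a t : Int × Int × Int) (x : Int × Int) :
    mergeT a (combine t x) = combine (mergeT a t) x := by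
  obtain ⟨b, lb, lg⟩ := a; obtain ⟨tb, tlb, tlg⟩ := t; obtain ⟨xs, xl⟩ := x
  simp only [mergeT, combine, Prod.ext_iff]
  constructor
  · omega
  · split_ifs <;> simp_all <;> omega

theorem mergeT_single (a : Int × Int × Int) (s l : Int) :
    mergeT a (s, s, l) = combine a (s, l) := by
  obtain ⟨b, lb, lg⟩ := a; rfl

theorem mergeT_foldl (a t : Int × Int × Int) (L : List (Int × Int)) :
    mergeT a (L.foldl combine t) = L.foldl combine (mergeT a t) := by
  induction L generalizing t with
  | nil => rfl
  | cons x xs ih => simpa [List.foldl, mergeT_combine] using ih (combine t x)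

-- ===== characterisation of A =====

def kidsOf (st : List (Int × Int) × Int × Int × Int) : List (List (Int × Int) × Int × Int × Int) :=
  kids st.1 st.1 st.2.1 st.2.2.1 st.2.2.2

theorem attach_flatMap_nodes (l : List (List (Int × Int) × Int × Int × Int)) :
    l.attach.flatMap (fun c => nodes c.1) = l.flatMap nodes := by
  conv_rhs => rw [← List.attach_map_subtype_val l]
  rw [List.flatMap_map]

theorem nodes_def (st : List (Int × Int) × Int × Int × Int) :
    nodes st = pval st :: (kidsOf st).flatMap nodes := by
  rw [nodes, attach_flatMap_nodes]; rfl

theorem sumP_append (p : List (Int × Int)) (v : Int × Int) :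
    ((p ++ [v]).map (fun i => i.1 + i.2)).sum = (p.map (fun i => i.1 + i.2)).sum + (v.1 + v.2) := by
  simp

theorem lenI_append (p : List (Int × Int)) (v : Int × Int) :
    Int.ofNat (p ++ [v]).length = Int.ofNat p.length + 1 := by
  simp

theorem searchFor_eq (N : Nat)
    (IH : ∀ pp p n, pp.length ≤ N →
      search pp p n =
        ((kids pp pp n ((p.map (fun i => i.1 + i.2)).sum) (Int.ofNat p.length)).flatMap nodes).foldl
          combine
          ((p.map (fun i => i.1 + i.2)).sum, (p.map (fun i => i.1 + i.2)).sum, Int.ofNat p.length))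
    (todo pp p : List (Int × Int)) (n : Int) (hlen : pp.length ≤ N + 1) :
    ∀ (b lb lg : Int),
    searchFor todo pp p n b lb lg =
      ((kids todo pp n ((p.map (fun i => i.1 + i.2)).sum) (Int.ofNat p.length)).flatMap
          nodes).foldl combine (b, lb, lg) := by
  induction todo with
  | nil => intro b lb lg; rw [searchFor, kids]; rfl
  | cons v rest ih =>
    intro b lb lg
    rw [searchFor, kids]
    by_cases hm : n = v.1 ∨ n = v.2
    · simp only [hm, not_true_eq_false, if_false, if_true]
      cases hrem : PySem.List.remove? pp v with
      | none => simpa using ih b lb lg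
      | some pp2 =>
        have hlen2 : pp2.length ≤ N := by
          have := remove?_some_length_lt hrem; omega
        have hs := IH pp2 (p ++ [v]) (if v.1 = n then v.2 else v.1) hlen2
        rw [sumP_append, lenI_append] at hs
        -- the child state produced by kids
        set s0 := (p.map (fun i => i.1 + i.2)).sum with hs0
        set l0 := Int.ofNat p.length with hl0
        set c : List (Int × Int) × Int × Int × Int :=
          (pp2, if v.1 = n then v.2 else v.1, s0 + v.1 + v.2, l0 + 1) with hc
        have hkc : kids pp2 pp2 (if v.1 = n then v.2 else v.1) (s0 + (v.1 + v.2)) (l0 + 1)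
            = kidsOf c := by
          simp only [kidsOf, hc]; ring_nf
        have hnodes : nodes c = (s0 + v.1 + v.2, l0 + 1) :: (kidsOf c).flatMap nodes := by
          rw [nodes_def]; rfl
        have hr : search pp2 (p ++ [v]) (if v.1 = n then v.2 else v.1)
            = ((kidsOf c).flatMap nodes).foldl combine (s0 + v.1 + v.2, s0 + v.1 + v.2, l0 + 1) := by
          rw [hs, hkc]
          congr 1 <;> ring_nf
        have hmerge : ∀ (r : Int × Int × Int), r = search pp2 (p ++ [v]) (if v.1 = n then v.2 else v.1) →
            (if r.2.2 > lg ∨ (r.2.2 = lg ∧ r.2.1 > lb)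
             then searchFor rest pp p n (max b r.1) r.2.1 r.2.2
             else searchFor rest pp p n (max b r.1) lb lg)
            = searchFor rest pp p n (mergeT (b, lb, lg) r).1 (mergeT (b, lb, lg) r).2.1
                (mergeT (b, lb, lg) r).2.2 := by
          intro r _
          by_cases hcond : r.2.2 > lg ∨ (r.2.2 = lg ∧ r.2.1 > lb)
          · rw [if_pos hcond]
            simp only [mergeT, if_pos hcond]
          · rw [if_neg hcond]
            simp only [mergeT, if_neg hcond]
        show (if _ > lg ∨ _ then _ else _) = _
        rw [hmerge _ rfl, ih]
        have : mergeT (b, lb, lg) (search pp2 (p ++ [v]) (if v.1 = n then v.2 else v.1))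
            = (nodes c).foldl combine (b, lb, lg) := by
          rw [hr, mergeT_foldl, mergeT_single, hnodes, List.foldl_cons]
        rw [this]
        simp only [List.flatMap_append, List.flatMap_cons, List.flatMap_nil, List.foldl_append,
          List.append_nil, Prod.mk.eta]
        rw [← hc]
    · simp only [hm, not_false_eq_true, if_true, if_false]
      simpa [hm] using ih b lb lg

theorem search_eq_aux (N : Nat) : ∀ (pp p : List (Int × Int)) (n : Int), pp.length ≤ N →
    search pp p n =
      ((kids pp pp n ((p.map (fun i => i.1 + i.2)).sum) (Int.ofNat p.length)).flatMap
          nodes).foldl combine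
        ((p.map (fun i => i.1 + i.2)).sum, (p.map (fun i => i.1 + i.2)).sum, Int.ofNat p.length) := by
  induction N with
  | zero =>
    intro pp p n h
    have : pp = [] := List.eq_nil_of_length_eq_zero (by omega)
    subst this
    rw [search, searchFor, kids]
    rfl
  | succ N ihN =>
    intro pp p n h
    rw [search]
    exact searchFor_eq N ihN pp pp p n h _ _ _

theorem search_eq (pp p : List (Int × Int)) (n : Int) :
    search pp p n =
      ((kids pp pp n ((p.map (fun i => i.1 + i.2)).sum) (Int.ofNat p.length)).flatMap
          nodes).foldl combine
        ((p.map (fun i => i.1 + i.2)).sum, (p.map (fun i => i.1 + i.2)).sum, Int.ofNat p.length) :=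
  search_eq_aux pp.length pp p n le_rfl

-- ===== characterisation of B =====

def conv (a : Int × Int × Int) : Int × Int × Int := (a.1, a.2.2, a.2.1)

def nodesF (fr : List (List (Int × Int) × Int × Int × Int)) : List (Int × Int) :=
  fr.flatMap nodes

theorem conv_bump (a : Int × Int × Int) (st : List (Int × Int) × Int × Int × Int) :
    conv (bump a st) = combine (conv a) (pval st) := by
  obtain ⟨b, bl, bs⟩ := a
  simp only [conv, bump, combine, pval, Prod.ext_iff]
  constructor
  · split_ifs <;> simp_all <;> omega
  · split_ifs <;> simp_all <;> omega

theorem perm_middle_swap {α : Type} (C M S : List α) :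
    List.Perm (C ++ (M ++ S)) (M ++ (C ++ S)) := by
  have h2 : List.Perm ((C ++ M) ++ S) ((M ++ C) ++ S) :=
    List.perm_append_comm.append_right S
  have h3 : List.Perm (C ++ (M ++ S)) ((M ++ C) ++ S) := by
    rw [← List.append_assoc]; exact h2
  simpa [List.append_assoc] using h3

theorem nodesF_perm (fr : List (List (Int × Int) × Int × Int × Int)) :
    List.Perm (nodesF fr) (fr.map pval ++ nodesF (altStep fr)) := by
  induction fr with
  | nil => simp [nodesF, altStep]
  | cons st rest ih =>
    have h1 : nodesF (st :: rest) = nodes st ++ nodesF rest := by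
      simp [nodesF]
    have h2 : nodesF (altStep (st :: rest)) = nodesF (kidsOf st) ++ nodesF (altStep rest) := by
      simp [nodesF, altStep, kidsOf, List.flatMap_append]
    rw [h1, h2, nodes_def]
    simp only [List.map_cons, List.cons_append]
    refine List.Perm.cons _ ?_
    exact (ih.append_left _).trans
      (perm_middle_swap (List.flatMap nodes (kidsOf st)) (rest.map pval) (nodesF (altStep rest)))

theorem conv_foldl_bump (nxt : List (List (Int × Int) × Int × Int × Int)) (a : Int × Int × Int) :
    conv (nxt.foldl bump a) = (nxt.map pval).foldl combine (conv a) := by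
  induction nxt generalizing a with
  | nil => rfl
  | cons st rest ih => simp only [List.foldl_cons, List.map_cons, ih, conv_bump]

theorem altLoop_eq (j : Nat) (fr : List (List (Int × Int) × Int × Int × Int))
    (a : Int × Int × Int) (h : ∀ st ∈ fr, st.1.length ≤ j) :
    conv (altLoop j fr a) = (nodesF (altStep fr)).foldl combine (conv a) := by
  induction j generalizing fr a with
  | zero =>
    have hempty : altStep fr = [] := by
      apply List.flatMap_eq_nil_iff.mpr
      intro st hst
      have h0 : st.1 = [] := List.eq_nil_of_length_eq_zero (Nat.le_zero.mp (h st hst))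
      rw [h0, kids]
    rw [altLoop, hempty]
    rfl
  | succ j ihj =>
    rw [altLoop]
    have hnext : ∀ st' ∈ altStep fr, st'.1.length ≤ j := by
      intro st' hst'
      obtain ⟨st, hst, hk⟩ := List.mem_flatMap.mp hst'
      have h1 := kids_length_lt hk
      have h2 := h st hst
      omega
    rw [ihj (altStep fr) _ hnext, conv_foldl_bump, ← List.foldl_append]
    exact ((nodesF_perm (altStep fr)).foldl_eq'
      (fun x _ y _ z => combine_right_comm z x y) (conv a)).symm

-- ===== VERDICT (by name: the statement is the Claim_ definition above) =====
theorem search_spec : Claim_equal_search := by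
  intro pp p n _
  show search pp p n = search_alt pp p n
  have h0 : ∀ st ∈ [(pp, n, (p.map (fun i => i.1 + i.2)).sum, Int.ofNat p.length)],
      st.1.length ≤ pp.length := by
    intro st hst
    rcases List.mem_singleton.mp hst with rfl
    exact le_rfl
  have halt : search_alt pp p n =
      conv (altLoop pp.length
        [(pp, n, (p.map (fun i => i.1 + i.2)).sum, Int.ofNat p.length)]
        ((p.map (fun i => i.1 + i.2)).sum, Int.ofNat p.length, (p.map (fun i => i.1 + i.2)).sum)) := rfl
  have ha : altStep [(pp, n, (p.map (fun i => i.1 + i.2)).sum, Int.ofNat p.length)]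
      = kids pp pp n ((p.map (fun i => i.1 + i.2)).sum) (Int.ofNat p.length) := by
    simp [altStep]
  rw [halt, altLoop_eq _ _ _ h0, ha, search_eq]
  rfl
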